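-- pv_equiv track=rewrite | github.com/ljunior23/mini-annapurna | compiler/tiler.py | tile_matmul
-- ===== SOURCE A (Python) =====
-- from typing import List, Tuple, NamedTuple
--
-- class Tile(NamedTuple):
--     """Represents a tile: (m_start, k_start, n_start, m_size, k_size, n_size)"""
--     m_start: int
--     k_start: int
--     n_start: int
--     m_size: int
--     k_size: int
--     n_size: int
--
--     def __repr__(self):
--         return f"Tile(M[{self.m_start}:{self.m_start + self.m_size}], " \
--                f"K[{self.k_start}:{self.k_start + self.k_size}], " \
--                f"N[{self.n_start}:{self.n_start + self.n_size}])"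
--
-- def tile_matmul(m: int, k: int, n: int,
--                 tile_m: int = 256,
--                 tile_k: int = 256,
--                 tile_n: int = 256) -> List[Tile]:
--     """
--     Split matrix multiply C[M×N] = A[M×K] @ B[K×N] into tiles.
--
--     Args:
--         m, k, n: Matrix dimensions
--         tile_m, tile_k, tile_n: Maximum tile sizes (default 256 for systolic array)
--
--     Returns:
--         List of tiles to process
--     """
--     tiles = []
--
--     # Tile the M dimension
--     for m_start in range(0, m, tile_m):
--         m_size = min(tile_m, m - m_start)
--
--         # Tile the N dimension
--         for n_start in range(0, n, tile_n):
--             n_size = min(tile_n, n - n_start)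
--
--             # Tile the K dimension (reduction axis)
--             for k_start in range(0, k, tile_k):
--                 k_size = min(tile_k, k - k_start)
--
--                 tiles.append(Tile(
--                     m_start=m_start,
--                     k_start=k_start,
--                     n_start=n_start,
--                     m_size=m_size,
--                     k_size=k_size,
--                     n_size=n_size
--                 ))
--
--     return tiles
-- ===== SOURCE B (Python) =====
-- from typing import NamedTuple
--
-- class Tile(NamedTuple):
--     m_start: int
--     k_start: int
--     n_start: int
--     m_size: int
--     k_size: int
--     n_size: int
--
--     def __repr__(self):
--         return f"Tile(M[{self.m_start}:{self.m_start + self.m_size}], " \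
--                f"K[{self.k_start}:{self.k_start + self.k_size}], " \
--                f"N[{self.n_start}:{self.n_start + self.n_size}])"
--
-- def tile_matmul(m, k, n, tile_m=256, tile_k=256, tile_n=256):
--     # Closed-form enumeration: compute the tile count per axis by ceiling
--     # division, then decode each flat tile index t into its (m, n, k)
--     # coordinates with divmod -- one flat loop, no nested iteration.
--     def count(dim, step):
--         return max(0, -(-dim // step))  # ceil(dim/step), 0 if empty
--
--     cm, cn, ck = count(m, tile_m), count(n, tile_n), count(k, tile_k)
--     tiles = []
--     for t in range(cm * cn * ck):
--         rem, kk = divmod(t, ck)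
--         i, j = divmod(rem, cn)
--         ms, ns, ks = i * tile_m, j * tile_n, kk * tile_k
--         tiles.append(Tile(ms, ks, ns,
--                           min(tile_m, m - ms),
--                           min(tile_k, k - ks),
--                           min(tile_n, n - ns)))
--     return tiles
-- ===== Notes on version B (the rewrite author's own statement) =====
-- stated objective: alternative
-- what changed: B computes the per-axis tile counts in closed form by ceiling division and runs one flat loop over the total count, decoding each flat index into (m,n,k) tile coordinates with divmod, instead of A's three nested range loops.
-- outside the precondition, e.g. on tile_matmul(-1, 5, 0, 1819, 0, 4): A returns [], B raises ZeroDivisionError; on tile_matmul(0, 3, 5, 7, 0, 0): A returns [], B raises ZeroDivisionError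
import Mathlib
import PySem

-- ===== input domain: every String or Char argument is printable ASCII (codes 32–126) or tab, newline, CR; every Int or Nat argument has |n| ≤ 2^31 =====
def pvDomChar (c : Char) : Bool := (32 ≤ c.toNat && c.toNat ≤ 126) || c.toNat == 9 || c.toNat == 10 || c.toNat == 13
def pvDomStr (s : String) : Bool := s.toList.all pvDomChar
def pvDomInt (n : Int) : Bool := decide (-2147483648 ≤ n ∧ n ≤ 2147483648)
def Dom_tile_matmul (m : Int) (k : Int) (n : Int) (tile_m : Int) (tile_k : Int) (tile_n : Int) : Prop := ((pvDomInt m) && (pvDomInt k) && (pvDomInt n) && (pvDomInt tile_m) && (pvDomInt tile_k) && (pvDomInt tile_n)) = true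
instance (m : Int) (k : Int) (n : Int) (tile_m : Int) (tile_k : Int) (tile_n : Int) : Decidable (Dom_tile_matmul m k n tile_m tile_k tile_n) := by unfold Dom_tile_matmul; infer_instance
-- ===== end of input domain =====

-- B replaces A's triple-nested loop by a closed-form tile count (ceiling division per axis)
-- and one flat loop that decodes each tile index with divmod (no speed claim: same output size).

-- ===== PORT A =====
def tile_matmul (m : Int) (k : Int) (n : Int) (tile_m : Int) (tile_k : Int) (tile_n : Int) : List (Int × Int × Int × Int × Int × Int) :=
  (PySem.List.pyRange 0 m tile_m).foldl (fun tiles m_start =>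
    let m_size := min tile_m (m - m_start)
    (PySem.List.pyRange 0 n tile_n).foldl (fun tiles n_start =>
      let n_size := min tile_n (n - n_start)
      (PySem.List.pyRange 0 k tile_k).foldl (fun tiles k_start =>
        let k_size := min tile_k (k - k_start)
        tiles ++ [(m_start, k_start, n_start, m_size, k_size, n_size)]) tiles) tiles) []

-- ===== PORT B =====
-- count dim step = max(0, -(-dim // step)) : the number of tiles along one axis (ceil division)
def pvTileCount (dim step : Int) : Int := max 0 (-(PySem.Int.floordiv (-dim) step))

def tile_matmul_alt (m : Int) (k : Int) (n : Int) (tile_m : Int) (tile_k : Int) (tile_n : Int) : List (Int × Int × Int × Int × Int × Int) :=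
  let cm := pvTileCount m tile_m
  let cn := pvTileCount n tile_n
  let ck := pvTileCount k tile_k
  (PySem.List.pyRange 0 (cm * cn * ck) 1).foldl (fun tiles t =>
    let rem := PySem.Int.floordiv t ck
    let kk := PySem.Int.mod t ck
    let i := PySem.Int.floordiv rem cn
    let j := PySem.Int.mod rem cn
    let ms := i * tile_m
    let ns := j * tile_n
    let ks := kk * tile_k
    tiles ++ [(ms, ks, ns, min tile_m (m - ms), min tile_k (k - ks), min tile_n (n - ns))]) []

-- ===== PRECONDITION & SPEC =====
-- Pre_ excludes zero tile steps: range(step=0) raises ValueError in A (and B's ceiling division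
-- raises ZeroDivisionError); A still returns [] when an empty outer range keeps the zero-step
-- range unconstructed, but B computes all three axis counts eagerly and itself raises there.
def Pre_tile_matmul (m : Int) (k : Int) (n : Int) (tile_m : Int) (tile_k : Int) (tile_n : Int) : Prop :=
  tile_m ≠ 0 ∧ tile_k ≠ 0 ∧ tile_n ≠ 0
instance (m : Int) (k : Int) (n : Int) (tile_m : Int) (tile_k : Int) (tile_n : Int) : Decidable (Pre_tile_matmul m k n tile_m tile_k tile_n) := by unfold Pre_tile_matmul; infer_instance
def pvWitness_tile_matmul : Int × Int × Int × Int × Int × Int := (5, 4, 3, 2, 2, 2)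
def Spec_tile_matmul (m : Int) (k : Int) (n : Int) (tile_m : Int) (tile_k : Int) (tile_n : Int) (out : List (Int × Int × Int × Int × Int × Int)) : Prop := out = tile_matmul_alt m k n tile_m tile_k tile_n
instance (m : Int) (k : Int) (n : Int) (tile_m : Int) (tile_k : Int) (tile_n : Int) (out : List (Int × Int × Int × Int × Int × Int)) : Decidable (Spec_tile_matmul m k n tile_m tile_k tile_n out) := by unfold Spec_tile_matmul; infer_instance

-- ===== CLAIM =====
def Claim_equal_tile_matmul : Prop := ∀ (m : Int) (k : Int) (n : Int) (tile_m : Int) (tile_k : Int) (tile_n : Int), Dom_tile_matmul m k n tile_m tile_k tile_n → Pre_tile_matmul m k n tile_m tile_k tile_n → Spec_tile_matmul m k n tile_m tile_k tile_n (tile_matmul m k n tile_m tile_k tile_n)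

-- ===== LEMMAS AND PROOFS =====

-- ceiling division via floor: (x + d - 1) / d = -((-x) / d) for 0 < d
theorem pv_ceil_eq (x d : Int) (hd : 0 < d) : (x + d - 1) / d = -((-x) / d) := by
  have h := Int.ediv_emod_unique (a := -x) (b := d) (r := (-x) % d) (q := (-x) / d) hd
  obtain ⟨heq, hr0, hrd⟩ := h.mp ⟨rfl, rfl⟩
  have hx : x + d - 1 = (d - 1 - (-x) % d) + d * (-((-x) / d)) := by ring_nf; omega
  rw [hx, Int.add_mul_ediv_left _ _ (by omega : d ≠ 0),
      Int.ediv_eq_zero_of_lt (by omega) (by omega), zero_add]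

-- range(0, dim, step) as a mapped List.range of length pvTileCount
theorem pv_pyRange_count (dim step : Int) (hs : step ≠ 0) :
    PySem.List.pyRange 0 dim step =
      (List.range (pvTileCount dim step).toNat).map (fun i : Nat => step * (i : Int)) := by
  have hcount : (if 0 < step then (if (0:Int) < dim then ((dim - 0 + step - 1) / step).toNat else 0)
      else (if dim < (0:Int) then ((0 - dim + -step - 1) / (-step)).toNat else 0))
      = (pvTileCount dim step).toNat := by
    unfold pvTileCount
    rcases lt_or_gt_of_ne hs with hneg | hpos
    · have hd : (0:Int) < -step := by omega
      have hf : PySem.Int.floordiv (-dim) step = dim / (-step) := by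
        have h1 := PySem.Int.floordiv_neg_neg dim (-step)
        simp only [neg_neg] at h1
        rw [h1]
        exact PySem.Int.floordiv_eq_ediv_of_pos hd
      rw [if_neg (by omega : ¬ (0:Int) < step), hf]
      by_cases hdim : dim < (0:Int)
      · rw [if_pos hdim, show (0:Int) - dim + -step - 1 = (-dim) + (-step) - 1 from by ring,
            pv_ceil_eq (-dim) (-step) hd]
        simp only [neg_neg]
        have hnn : 0 ≤ -(dim / -step) := by
          have h2 := pv_ceil_eq (-dim) (-step) hd
          simp only [neg_neg] at h2
          rw [← h2]
          exact Int.ediv_nonneg (by omega) (by omega)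
        rw [max_eq_right hnn]
      · rw [if_neg hdim]
        have h0 : 0 ≤ dim / (-step) := Int.ediv_nonneg (by omega) (le_of_lt hd)
        rw [max_eq_left (by omega)]
        rfl
    · rw [if_pos hpos]
      rw [PySem.Int.floordiv_eq_ediv_of_pos hpos]
      by_cases hdim : (0:Int) < dim
      · rw [if_pos hdim, show dim - 0 + step - 1 = dim + step - 1 from by ring,
            pv_ceil_eq dim step hpos]
        have hnn : 0 ≤ -(-dim / step) := by
          rw [← pv_ceil_eq dim step hpos]
          exact Int.ediv_nonneg (by omega) (by omega)
        rw [max_eq_right hnn]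
      · rw [if_neg hdim]
        have h0 : 0 ≤ (-dim) / step := Int.ediv_nonneg (by omega) (le_of_lt hpos)
        rw [max_eq_left (by omega)]
        rfl
  unfold PySem.List.pyRange
  rw [if_neg hs]
  simp only [zero_add]
  rw [hcount]

-- flat index decoding: range (p*q) split by divmod equals nested ranges
theorem pv_range_mul_decode {α : Type} (p q : Nat) (g : Nat → Nat → List α) :
    (List.range (p * q)).flatMap (fun t => g (t / q) (t % q)) =
      (List.range p).flatMap (fun i => (List.range q).flatMap (g i)) := by
  induction p with
  | zero => simp
  | succ p ih =>
    rcases Nat.eq_zero_or_pos q with hq | hq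
    · subst hq; simp
    · rw [Nat.succ_mul, List.range_add, List.flatMap_append, ih,
          List.range_succ, List.flatMap_append, List.flatMap_singleton]
      congr 1
      rw [List.flatMap_map]
      apply List.flatMap_congr
      intro r hr
      have hrq : r < q := List.mem_range.mp hr
      have h1 : (p * q + r) / q = p := by
        rw [Nat.add_comm, Nat.add_mul_div_right _ _ hq, Nat.div_eq_of_lt hrq, Nat.zero_add]
      have h2 : (p * q + r) % q = r := by
        rw [Nat.add_comm, Nat.add_mul_mod_self_right, Nat.mod_eq_of_lt hrq]
      rw [h1, h2]

-- tuple built for tile (i, j, kk) of the index grid (proof-side helper)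
def pvTup (m k n tile_m tile_k tile_n : Int) (i j kk : Nat) : Int × Int × Int × Int × Int × Int :=
  ((i : Int) * tile_m, (kk : Int) * tile_k, (j : Int) * tile_n,
   min tile_m (m - (i : Int) * tile_m), min tile_k (k - (kk : Int) * tile_k),
   min tile_n (n - (j : Int) * tile_n))

theorem pvTup_fold (m k n tile_m tile_k tile_n : Int) : ∀ (i j kk : Nat),
    (((i : Int)) * tile_m, ((kk : Int)) * tile_k, ((j : Int)) * tile_n,
      min tile_m (m - ((i : Int)) * tile_m), min tile_k (k - ((kk : Int)) * tile_k),
      min tile_n (n - ((j : Int)) * tile_n)) = pvTup m k n tile_m tile_k tile_n i j kk :=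
  fun _ _ _ => rfl

-- ===== VERDICT =====
theorem tile_matmul_spec : Claim_equal_tile_matmul := by
  intro m k n tile_m tile_k tile_n _ hpre
  obtain ⟨hm, hk, hn⟩ := hpre
  have h0m : (0:Int) ≤ pvTileCount m tile_m := le_max_left _ _
  have h0n : (0:Int) ≤ pvTileCount n tile_n := le_max_left _ _
  have h0k : (0:Int) ≤ pvTileCount k tile_k := le_max_left _ _
  unfold Spec_tile_matmul tile_matmul tile_matmul_alt
  simp only [PySem.List.foldl_append_singleton_eq_map, PySem.List.foldl_append_eq_flatMap,
    List.nil_append]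
  rw [pv_pyRange_count m tile_m hm, pv_pyRange_count n tile_n hn, pv_pyRange_count k tile_k hk,
      PySem.List.pyRange_one]
  have htot : (pvTileCount m tile_m * pvTileCount n tile_n * pvTileCount k tile_k - 0).toNat
      = (pvTileCount m tile_m).toNat * (pvTileCount n tile_n).toNat * (pvTileCount k tile_k).toNat := by
    rw [sub_zero]
    conv_lhs => rw [← Int.toNat_of_nonneg h0m, ← Int.toNat_of_nonneg h0n, ← Int.toNat_of_nonneg h0k]
    norm_cast
  rw [htot]
  have hckI : pvTileCount k tile_k = (((pvTileCount k tile_k).toNat : Nat) : Int) :=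
    (Int.toNat_of_nonneg h0k).symm
  have hcnI : pvTileCount n tile_n = (((pvTileCount n tile_n).toNat : Nat) : Int) :=
    (Int.toNat_of_nonneg h0n).symm
  conv_rhs => rw [hckI, hcnI]
  simp only [List.map_map, Function.comp_def, zero_add, PySem.Int.floordiv_natCast,
    PySem.Int.mod_natCast, Int.toNat_natCast, pvTup_fold]
  set Cm := (pvTileCount m tile_m).toNat with hCm
  set Cn := (pvTileCount n tile_n).toNat with hCn
  set Ck := (pvTileCount k tile_k).toNat with hCk
  conv_rhs => rw [List.map_eq_flatMap]
  have h1 : (List.range (Cm * Cn * Ck)).flatMap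
        (fun t => [pvTup m k n tile_m tile_k tile_n (t / Ck / Cn) (t / Ck % Cn) (t % Ck)])
      = (List.range (Cm * Cn)).flatMap (fun rem => (List.range Ck).flatMap
          (fun kk => [pvTup m k n tile_m tile_k tile_n (rem / Cn) (rem % Cn) kk])) :=
    pv_range_mul_decode (Cm * Cn) Ck
      (fun rem kk => [pvTup m k n tile_m tile_k tile_n (rem / Cn) (rem % Cn) kk])
  rw [h1]
  have h2 : (List.range (Cm * Cn)).flatMap (fun rem => (List.range Ck).flatMap
        (fun kk => [pvTup m k n tile_m tile_k tile_n (rem / Cn) (rem % Cn) kk]))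
      = (List.range Cm).flatMap (fun i => (List.range Cn).flatMap (fun j =>
          (List.range Ck).flatMap (fun kk => [pvTup m k n tile_m tile_k tile_n i j kk]))) :=
    pv_range_mul_decode Cm Cn
      (fun i j => (List.range Ck).flatMap (fun kk => [pvTup m k n tile_m tile_k tile_n i j kk]))
  rw [h2]
  simp only [List.flatMap_map, List.map_map, Function.comp_def, ← List.map_eq_flatMap]
  congr 1
  funext i
  congr 1
  funext j
  congr 1
  funext kk
  simp [pvTup, mul_comm]
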